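-- pv_equiv track=rewrite | github.com/jasonmayday/LeetCode | leetcode_cup/2_medium/LCP 45. 自行车炫技赛场.py | bicycleYard
-- ===== SOURCE A (Python) =====
-- from typing import List
-- from collections import deque
--
-- def bicycleYard(position: List[int], terrain: List[List[int]], obstacle: List[List[int]]) -> List[List[int]]:
--     Row = len(terrain)
--     Col = len(terrain[0])
--
--     res = set()
--     visited = [[set() for _ in range(Col)] for _ in range(Row)]
--     sr, sc = position[0], position[1]
--
--     q = deque()
--     q.append((sr, sc, 1))
--     while q:
--         r, c, cur_speed = q.popleft()
--         if cur_speed in visited[r][c]: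
--             continue
--         visited[r][c].add(cur_speed)
--         if (cur_speed == 1) and (r, c) != (position[0], position[1]):
--             res.add((r, c))
--             if len(res) == Row * Col:
--                 break
--         for nr, nc in [(r-1,c), (r+1,c), (r,c-1), (r,c+1)]:
--             if 0 <= nr < Row and 0 <= nc < Col:
--                 nxt_speed = terrain[r][c] - terrain[nr][nc] - obstacle[nr][nc] + cur_speed
--                 if nxt_speed > 0:
--                     q.append((nr, nc, nxt_speed))
--
--     return sorted(list(res))
-- ===== SOURCE B (Python) =====
-- def bicycleYard(position, terrain, obstacle):
--     # Round-based naive fixed-point (Kleene) iteration instead of a worklist BFS: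
--     # each round recomputes the successor image of the whole visited set and
--     # unions it in, until the image is already contained in visited.
--     Row, Col = len(terrain), len(terrain[0])
--     sr, sc = position[0], position[1]
--     visited = {(sr, sc, 1)}
--     while True:
--         image = set()
--         for r, c, v in visited:
--             h = terrain[r][c] + v
--             for nr, nc in ((r - 1, c), (r + 1, c), (r, c - 1), (r, c + 1)):
--                 if 0 <= nr < Row and 0 <= nc < Col:
--                     nxt = h - terrain[nr][nc] - obstacle[nr][nc]
--                     if nxt > 0:
--                         image.add((nr, nc, nxt))
--         if image <= visited:
--             break
--         visited |= image
--     return sorted({(r, c) for r, c, v in visited if v == 1 and (r, c) != (sr, sc)})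
-- ===== Notes on version B (the rewrite author's own statement) =====
-- stated objective: alternative
-- what changed: The worklist BFS (deque, per-pop visited check, dead early break) is replaced by round-based naive fixed-point (Kleene) iteration: each round recomputes the one-step successor image of the entire visited set and unions it in, stopping when the image is already contained in visited; there is no queue, no per-state pop/skip logic, and cells at speed 1 are collected by one comprehension over the saturated set at the end.
-- outside the precondition, e.g. on bicycleYard([-1, 0], [[0]], [[0]]): A returns [], B returns [(0, 0)]; on bicycleYard([0, 0], [[0, 0, 9]], [[3, -1, 0]]): A returns [], B returns []
import Mathlib
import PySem

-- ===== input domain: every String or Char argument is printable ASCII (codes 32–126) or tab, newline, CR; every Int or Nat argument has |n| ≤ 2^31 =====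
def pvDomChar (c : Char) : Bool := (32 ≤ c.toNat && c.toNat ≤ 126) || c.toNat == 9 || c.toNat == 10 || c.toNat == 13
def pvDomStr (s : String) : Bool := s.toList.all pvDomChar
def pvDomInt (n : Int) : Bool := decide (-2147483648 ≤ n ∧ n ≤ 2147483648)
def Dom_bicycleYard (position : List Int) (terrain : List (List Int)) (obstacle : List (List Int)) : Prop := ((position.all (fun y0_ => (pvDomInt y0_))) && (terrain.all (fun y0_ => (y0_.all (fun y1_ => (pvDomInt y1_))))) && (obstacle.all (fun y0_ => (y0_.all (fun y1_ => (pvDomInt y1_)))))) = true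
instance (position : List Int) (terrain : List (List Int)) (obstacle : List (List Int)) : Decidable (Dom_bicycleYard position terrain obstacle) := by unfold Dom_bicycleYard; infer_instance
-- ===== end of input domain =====

-- B replaces the worklist BFS by round-based naive fixed-point iteration (whole-set successor
-- image each round until saturation); same resulting set, no queue and no per-state skip logic.

-- ===== PORT A =====
-- shared helper: terrain[r][c] / obstacle[r][c]; exact for the in-range indices the loops use
def pvG2 (g : List (List Int)) (r c : Int) : Int :=
  (PySem.List.pyGet? ((PySem.List.pyGet? g r).getD []) c).getD 0

-- the inner 'for nr, nc in [...]' body of both Pythons: the in-bounds neighbours with positive next speed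
def pvSucc (Row Col : Int) (terrain obstacle : List (List Int)) (r c v : Int) :
    List (Int × Int × Int) :=
  [(r-1,c),(r+1,c),(r,c-1),(r,c+1)].filterMap (fun p =>
    if 0 ≤ p.1 ∧ p.1 < Row ∧ 0 ≤ p.2 ∧ p.2 < Col then
      if 0 < pvG2 terrain r c - pvG2 terrain p.1 p.2 - pvG2 obstacle p.1 p.2 + v then
        some (p.1, p.2, pvG2 terrain r c - pvG2 terrain p.1 p.2 - pvG2 obstacle p.1 p.2 + v)
      else none
    else none)

-- an upper bound on every reachable speed (used only to size the fuel)
def pvSpread (terrain obstacle : List (List Int)) : Int :=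
  terrain.flatten.foldl max 0 - terrain.flatten.foldl min 0 + 1
    - 2 * obstacle.flatten.foldl min 0

-- A's while loop; fuel only makes the recursion total (the proof shows it is never exhausted)
def pvLoopA (Row Col sr sc : Int) (terrain obstacle : List (List Int)) :
    Nat → PySem.Set (Int × Int) → PySem.Set (Int × Int × Int) → List (Int × Int × Int) →
    PySem.Set (Int × Int) × PySem.Set (Int × Int × Int)
  | 0, res, vis, _ => (res, vis)
  | _+1, res, vis, [] => (res, vis)
  | f+1, res, vis, (r, c, v) :: q =>
    if (r, c, v) ∈ vis then pvLoopA Row Col sr sc terrain obstacle f res vis q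
    else
      let vis' := PySem.Set.add vis (r, c, v)
      if v = 1 ∧ (r, c) ≠ (sr, sc) then
        let res' := PySem.Set.add res (r, c)
        if (res'.length : Int) = Row * Col then (res', vis')
        else pvLoopA Row Col sr sc terrain obstacle f res' vis'
               (q ++ pvSucc Row Col terrain obstacle r c v)
      else pvLoopA Row Col sr sc terrain obstacle f res vis'
             (q ++ pvSucc Row Col terrain obstacle r c v)

def bicycleYard (position : List Int) (terrain : List (List Int)) (obstacle : List (List Int)) : List (Int × Int) :=
  let Row : Int := terrain.length
  let Col : Int := (terrain.headD []).length
  let sr := (PySem.List.pyGet? position 0).getD 0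
  let sc := (PySem.List.pyGet? position 1).getD 0
  let fuel := (5 * (Row * Col * pvSpread terrain obstacle) + 2).toNat
  let p := pvLoopA Row Col sr sc terrain obstacle fuel PySem.Set.empty PySem.Set.empty [(sr, sc, 1)]
  PySem.List.sorted2 p.1 (fun q => q.1) (fun q => q.2)

-- ===== PORT B =====
-- B's inner neighbour loop with the loop-invariant read h = terrain[r][c] + v hoisted out
def pvSuccB (Row Col : Int) (terrain obstacle : List (List Int)) (r c v : Int) :
    List (Int × Int × Int) :=
  let h := pvG2 terrain r c + v
  [(r-1,c),(r+1,c),(r,c-1),(r,c+1)].filterMap (fun p =>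
    if 0 ≤ p.1 ∧ p.1 < Row ∧ 0 ≤ p.2 ∧ p.2 < Col then
      if 0 < h - pvG2 terrain p.1 p.2 - pvG2 obstacle p.1 p.2 then
        some (p.1, p.2, h - pvG2 terrain p.1 p.2 - pvG2 obstacle p.1 p.2)
      else none
    else none)

-- one round's successor image of the whole visited set (the nested 'for' loops building 'image')
def pvImage (Row Col : Int) (terrain obstacle : List (List Int))
    (vis : List (Int × Int × Int)) : PySem.Set (Int × Int × Int) :=
  vis.foldl (fun acc s => PySem.Set.update acc (pvSuccB Row Col terrain obstacle s.1 s.2.1 s.2.2))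
    PySem.Set.empty

-- B's 'while True' saturation loop; fuel only makes the recursion total (never exhausted under Pre_)
def pvLoopB (Row Col : Int) (terrain obstacle : List (List Int)) :
    Nat → PySem.Set (Int × Int × Int) → PySem.Set (Int × Int × Int)
  | 0, vis => vis
  | f+1, vis =>
    if PySem.Set.issubset (pvImage Row Col terrain obstacle vis) vis then vis
    else pvLoopB Row Col terrain obstacle f
      (PySem.Set.update vis (pvImage Row Col terrain obstacle vis))

def bicycleYard_alt (position : List Int) (terrain : List (List Int)) (obstacle : List (List Int)) : List (Int × Int) :=
  let Row : Int := terrain.length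
  let Col : Int := (terrain.headD []).length
  let sr := (PySem.List.pyGet? position 0).getD 0
  let sc := (PySem.List.pyGet? position 1).getD 0
  let fuel := (Row * Col * pvSpread terrain obstacle + 2).toNat
  let vis := pvLoopB Row Col terrain obstacle fuel (PySem.Set.ofList [(sr, sc, 1)])
  let res : PySem.Set (Int × Int) := PySem.Set.ofList (vis.filterMap (fun s =>
    if s.2.2 = 1 ∧ ((s.1, s.2.1) : Int × Int) ≠ (sr, sc) then some (s.1, s.2.1) else none))
  PySem.List.sorted2 res (fun q => q.1) (fun q => q.2)

-- ===== PRECONDITION & SPEC =====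
-- Pre_-side grid accessors (independent of the ports)
def pvIdx (i : Int) (n : Nat) : Nat := if 0 ≤ i then i.toNat else n - (-i).toNat

def pvCellP (g : List (List Int)) (i j : Nat) : Int := (g.getD i []).getD j 0

-- no neighbour of the start cell is enterable (next speed ≤ 0 everywhere): the ride never moves
abbrev pvStartStuck (terrain obstacle : List (List Int)) (sr sc : Int) : Prop :=
  ∀ q ∈ [(sr-1, sc), (sr+1, sc), (sr, sc-1), (sr, sc+1)],
    0 ≤ q.1 → q.1 < (terrain.length : Int) → 0 ≤ q.2 → q.2 < ((terrain.headD []).length : Int) →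
    pvCellP terrain (pvIdx sr terrain.length) (pvIdx sc (terrain.headD []).length)
      - pvCellP terrain q.1.toNat q.2.toNat - pvCellP obstacle q.1.toNat q.2.toNat + 1 ≤ 0

-- every pair of orthogonally adjacent obstacle values sums to ≥ 0 (then no cycle gains speed
-- and the BFS terminates; in particular any all-nonnegative obstacle grid qualifies)
abbrev pvAdjPre (obstacle : List (List Int)) : Prop :=
  ∀ i ∈ List.range obstacle.length, ∀ j ∈ List.range (obstacle.headD []).length,
    (i + 1 < obstacle.length → 0 ≤ pvCellP obstacle i j + pvCellP obstacle (i+1) j) ∧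
    (j + 1 < (obstacle.headD []).length → 0 ≤ pvCellP obstacle i j + pvCellP obstacle i (j+1))

-- Pre_ excludes malformed inputs (short position lists, empty or ragged grids, a start index
-- outside Python's wraparound range — there A raises IndexError), inputs whose obstacle grid
-- has an adjacent pair summing < 0 while the start can move (speeds can then grow without
-- bound and the BFS need not terminate), and moving starts at negative (wraparound) indices
-- (Python then aliases the start's visited set with the corresponding in-range cell's).
def Pre_bicycleYard (position : List Int) (terrain : List (List Int)) (obstacle : List (List Int)) : Prop :=
  2 ≤ position.length ∧
  terrain ≠ [] ∧ 0 < (terrain.headD []).length ∧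
  (∀ row ∈ terrain, row.length = (terrain.headD []).length) ∧
  obstacle.length = terrain.length ∧
  (∀ row ∈ obstacle, row.length = (terrain.headD []).length) ∧
  -(terrain.length : Int) ≤ position.getD 0 0 ∧
  position.getD 0 0 < (terrain.length : Int) ∧
  -((terrain.headD []).length : Int) ≤ position.getD 1 0 ∧
  position.getD 1 0 < ((terrain.headD []).length : Int) ∧
  (pvStartStuck terrain obstacle (position.getD 0 0) (position.getD 1 0) ∨
    (0 ≤ position.getD 0 0 ∧ 0 ≤ position.getD 1 0 ∧ pvAdjPre obstacle))
instance (position : List Int) (terrain : List (List Int)) (obstacle : List (List Int)) : Decidable (Pre_bicycleYard position terrain obstacle) := by unfold Pre_bicycleYard; infer_instance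

def pvWitness_bicycleYard : List Int × List (List Int) × List (List Int) :=
  ([0, 0], [[0, 1], [0, 0]], [[0, 0], [0, 1]])

def Spec_bicycleYard (position : List Int) (terrain : List (List Int)) (obstacle : List (List Int)) (out : List (Int × Int)) : Prop := out = bicycleYard_alt position terrain obstacle
instance (position : List Int) (terrain : List (List Int)) (obstacle : List (List Int)) (out : List (Int × Int)) : Decidable (Spec_bicycleYard position terrain obstacle out) := by unfold Spec_bicycleYard; infer_instance

-- ===== CLAIM (what is proved, stated in full; the proofs are below) =====
def Claim_equal_bicycleYard : Prop := ∀ (position : List Int) (terrain : List (List Int)) (obstacle : List (List Int)), Dom_bicycleYard position terrain obstacle → Pre_bicycleYard position terrain obstacle → Spec_bicycleYard position terrain obstacle (bicycleYard position terrain obstacle)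

-- ===== LEMMAS AND PROOFS =====

-- the reachable speed states of the yard: both programs saturate exactly this set
inductive PvReach (Row Col sr sc : Int) (terrain obstacle : List (List Int)) :
    Int × Int × Int → Prop
  | init : PvReach Row Col sr sc terrain obstacle (sr, sc, 1)
  | step {s t : Int × Int × Int} :
      PvReach Row Col sr sc terrain obstacle s →
      t ∈ pvSucc Row Col terrain obstacle s.1 s.2.1 s.2.2 →
      PvReach Row Col sr sc terrain obstacle t

-- the finite superset of all reachable states, and its cardinality bound
def pvInSpace (Row Col : Int) (terrain obstacle : List (List Int)) (s : Int × Int × Int) : Prop :=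
  0 ≤ s.1 ∧ s.1 < Row ∧ 0 ≤ s.2.1 ∧ s.2.1 < Col ∧ 1 ≤ s.2.2 ∧
  s.2.2 ≤ pvSpread terrain obstacle

def pvN (Row Col : Int) (terrain obstacle : List (List Int)) : Nat :=
  (Row * Col * pvSpread terrain obstacle).toNat

theorem pvMem_succ {Row Col : Int} {terrain obstacle : List (List Int)} {r c v : Int}
    {t : Int × Int × Int} (h : t ∈ pvSucc Row Col terrain obstacle r c v) :
    0 ≤ t.1 ∧ t.1 < Row ∧ 0 ≤ t.2.1 ∧ t.2.1 < Col ∧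
    t.2.2 = pvG2 terrain r c - pvG2 terrain t.1 t.2.1 - pvG2 obstacle t.1 t.2.1 + v ∧
    0 < t.2.2 ∧
    ((t.1 = r - 1 ∧ t.2.1 = c) ∨ (t.1 = r + 1 ∧ t.2.1 = c) ∨
     (t.1 = r ∧ t.2.1 = c - 1) ∨ (t.1 = r ∧ t.2.1 = c + 1)) := by
  simp only [pvSucc, List.mem_filterMap] at h
  obtain ⟨p, hp, heq⟩ := h
  have hnb : (p.1 = r - 1 ∧ p.2 = c) ∨ (p.1 = r + 1 ∧ p.2 = c) ∨
      (p.1 = r ∧ p.2 = c - 1) ∨ (p.1 = r ∧ p.2 = c + 1) := by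
    simp only [List.mem_cons, List.not_mem_nil, or_false] at hp
    rcases hp with rfl | rfl | rfl | rfl <;> simp
  split at heq
  · split at heq
    · simp only [Option.some.injEq] at heq
      subst heq
      simp_all
    · exact absurd heq (by simp)
  · exact absurd heq (by simp)

theorem pvSucc_length_le (Row Col : Int) (terrain obstacle : List (List Int)) (r c v : Int) :
    (pvSucc Row Col terrain obstacle r c v).length ≤ 4 :=
  le_trans (List.length_filterMap_le _ _) (by simp)

-- value of the grid at an in-range cell lies between the foldl min/max of the flattened grid
theorem pvG2_bounds {g : List (List Int)} {L : Nat}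
    (hrect : ∀ row ∈ g, row.length = L)
    {r c : Int} (hr0 : 0 ≤ r) (hr : r < (g.length : Int))
    (hc0 : 0 ≤ c) (hc : c < (L : Int)) :
    g.flatten.foldl min 0 ≤ pvG2 g r c ∧
    pvG2 g r c ≤ g.flatten.foldl max 0 := by
  have hrn : r.toNat < g.length := by omega
  have hrow : (PySem.List.pyGet? g r).getD [] = g[r.toNat] := by
    have := PySem.List.pyGetD_eq_getElem g ([] : List Int) hr0 hr
    simpa [PySem.List.pyGetD] using this
  have hmem : g[r.toNat] ∈ g := List.getElem_mem _
  have hlen : (g[r.toNat]).length = L := hrect _ hmem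
  have hcn : c < ((g[r.toNat]).length : Int) := by rw [hlen]; exact hc
  have hval : pvG2 g r c = (g[r.toNat])[c.toNat]'(by omega) := by
    unfold pvG2
    rw [hrow]
    have := PySem.List.pyGetD_eq_getElem (g[r.toNat]) (0 : Int) hc0 hcn
    simpa [PySem.List.pyGetD] using this
  have hmem2 : (g[r.toNat])[c.toNat]'(by omega) ∈ g.flatten := by
    rw [List.mem_flatten]
    exact ⟨g[r.toNat], hmem, List.getElem_mem _⟩
  constructor
  · rw [hval]; exact (PySem.List.foldl_min_le g.flatten 0).2 _ hmem2
  · rw [hval]; exact (PySem.List.le_foldl_max g.flatten 0).2 _ hmem2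

-- Python's xs[i] with wraparound, as plain indexing (used for both accessors below)
theorem pvGetWrap {α : Type} [Inhabited α] {xs : List α} {i : Int} {n : Nat}
    (hn : n = xs.length) (hlo : -(n : Int) ≤ i) (hi : i < (n : Int)) :
    PySem.List.pyGet? xs i = xs[pvIdx i n]? := by
  subst hn
  unfold PySem.List.pyGet? PySem.List.pyIdx?
  rcases le_or_gt 0 i with h0 | h0
  · rw [show pvIdx i xs.length = i.toNat from by unfold pvIdx; rw [if_pos h0]]
    rw [if_pos h0, if_pos hi]
    rfl
  · rw [show pvIdx i xs.length = xs.length - (-i).toNat from by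
      unfold pvIdx; rw [if_neg (by omega)]]
    rw [if_neg (by omega), if_pos hlo]
    rfl

-- the port's accessor agrees with the Pre_-side accessor, including Python's negative wraparound
theorem pvG2_wrap {g : List (List Int)} {L : Nat}
    (hrect : ∀ row ∈ g, row.length = L)
    {r c : Int} (hrlo : -(g.length : Int) ≤ r) (hr : r < (g.length : Int))
    (hclo : -(L : Int) ≤ c) (hc : c < (L : Int)) :
    pvG2 g r c = pvCellP g (pvIdx r g.length) (pvIdx c L) := by
  have hk : pvIdx r g.length < g.length := by unfold pvIdx; split <;> omega
  have hrow : (PySem.List.pyGet? g r).getD [] = g[pvIdx r g.length]'hk := by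
    rw [pvGetWrap rfl hrlo hr, List.getElem?_eq_getElem hk]
    rfl
  have hmem : g[pvIdx r g.length]'hk ∈ g := List.getElem_mem _
  have hlen : (g[pvIdx r g.length]'hk).length = L := hrect _ hmem
  have hj : pvIdx c L < L := by unfold pvIdx; split <;> omega
  have hcell : (PySem.List.pyGet? (g[pvIdx r g.length]'hk) c).getD 0 =
      (g[pvIdx r g.length]'hk)[pvIdx c L]'(by omega) := by
    rw [pvGetWrap hlen.symm hclo hc,
      List.getElem?_eq_getElem (by omega : pvIdx c L < (g[pvIdx r g.length]'hk).length)]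
    rfl
  have hgd : g.getD (pvIdx r g.length) [] = g[pvIdx r g.length]'hk := by
    rw [List.getD_eq_getElem?_getD, List.getElem?_eq_getElem hk]
    rfl
  unfold pvG2 pvCellP
  rw [hrow, hcell, hgd, List.getD_eq_getElem?_getD,
    List.getElem?_eq_getElem (by omega : pvIdx c L < (g[pvIdx r g.length]'hk).length)]
  rfl

-- for nonnegative in-range indices the two accessors agree with plain indexing
theorem pvG2_eq_cell {g : List (List Int)} {L : Nat}
    (hrect : ∀ row ∈ g, row.length = L)
    {r c : Int} (hr0 : 0 ≤ r) (hr : r < (g.length : Int))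
    (hc0 : 0 ≤ c) (hc : c < (L : Int)) :
    pvG2 g r c = pvCellP g r.toNat c.toNat := by
  have h := pvG2_wrap hrect (by omega : -(g.length : Int) ≤ r) hr (by omega : -(L : Int) ≤ c) hc
  rw [h]
  unfold pvIdx
  rw [if_pos hr0, if_pos hc0]

-- pvAdjPre gives the sum bound for any pair of orthogonally adjacent in-grid cells
theorem pvAdj_pair {terrain obstacle : List (List Int)} {Row Col : Int}
    (hRow : Row = terrain.length) (hCol : Col = ((terrain.headD []).length : Int))
    (holen : obstacle.length = terrain.length)
    (horect : ∀ row ∈ obstacle, row.length = (terrain.headD []).length)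
    (hadj : pvAdjPre obstacle) (hR1 : 0 < Row)
    {r c r' c' : Int}
    (hr0 : 0 ≤ r) (hr : r < Row) (hc0 : 0 ≤ c) (hc : c < Col)
    (hr0' : 0 ≤ r') (hr' : r' < Row) (hc0' : 0 ≤ c') (hc' : c' < Col)
    (hnb : (r' = r - 1 ∧ c' = c) ∨ (r' = r + 1 ∧ c' = c) ∨
           (r' = r ∧ c' = c - 1) ∨ (r' = r ∧ c' = c + 1)) :
    0 ≤ pvG2 obstacle r c + pvG2 obstacle r' c' := by
  have hone : obstacle ≠ [] := by
    intro h
    rw [h] at holen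
    simp at holen
    omega
  have hheado : (obstacle.headD []).length = (terrain.headD []).length := by
    match obstacle, hone with
    | a :: l, _ => exact horect a (List.mem_cons_self ..)
  have hcell : ∀ {x y : Int}, 0 ≤ x → x < Row → 0 ≤ y → y < Col →
      pvG2 obstacle x y = pvCellP obstacle x.toNat y.toNat := by
    intro x y h1 h2 h3 h4
    exact pvG2_eq_cell horect h1 (by omega) h3 (by omega)
  rw [hcell hr0 hr hc0 hc, hcell hr0' hr' hc0' hc']
  have hget : ∀ i j : Nat, i < obstacle.length → j < (obstacle.headD []).length →
      (i + 1 < obstacle.length → 0 ≤ pvCellP obstacle i j + pvCellP obstacle (i+1) j) ∧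
      (j + 1 < (obstacle.headD []).length → 0 ≤ pvCellP obstacle i j + pvCellP obstacle i (j+1)) :=
    fun i j hi hj => hadj i (List.mem_range.mpr hi) j (List.mem_range.mpr hj)
  rcases hnb with ⟨e1, e2⟩ | ⟨e1, e2⟩ | ⟨e1, e2⟩ | ⟨e1, e2⟩ <;> rw [e1, e2]
  · have h := (hget (r - 1).toNat c.toNat (by omega) (by omega)).1 (by omega)
    have h1 : (r - 1).toNat + 1 = r.toNat := by omega
    rw [h1] at h
    omega
  · have h := (hget r.toNat c.toNat (by omega) (by omega)).1 (by omega)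
    have h1 : r.toNat + 1 = (r + 1).toNat := by omega
    rw [h1] at h
    omega
  · have h := (hget r.toNat (c - 1).toNat (by omega) (by omega)).2 (by omega)
    have h1 : (c - 1).toNat + 1 = c.toNat := by omega
    rw [h1] at h
    omega
  · have h := (hget r.toNat c.toNat (by omega) (by omega)).2 (by omega)
    have h1 : c.toNat + 1 = (c + 1).toNat := by omega
    rw [h1] at h
    omega

-- every reachable state is an in-bounds cell with speed in [1, pvSpread]
theorem pvReach_inSpace {Row Col sr sc : Int} {terrain obstacle : List (List Int)}
    (hRow : Row = terrain.length) (hCol : Col = ((terrain.headD []).length : Int))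
    (hrect : ∀ row ∈ terrain, row.length = (terrain.headD []).length)
    (holen : obstacle.length = terrain.length)
    (horect : ∀ row ∈ obstacle, row.length = (terrain.headD []).length)
    (hadj : pvAdjPre obstacle)
    (hsr0 : 0 ≤ sr) (hsr : sr < Row) (hsc0 : 0 ≤ sc) (hsc : sc < Col)
    {s : Int × Int × Int} (h : PvReach Row Col sr sc terrain obstacle s) :
    pvInSpace Row Col terrain obstacle s := by
  -- the potential v + T(cell) - max(0, -O(cell)) never increases along a move
  have key : ∀ s, PvReach Row Col sr sc terrain obstacle s →
      0 ≤ s.1 ∧ s.1 < Row ∧ 0 ≤ s.2.1 ∧ s.2.1 < Col ∧ 1 ≤ s.2.2 ∧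
      s.2.2 ≤ 1 + pvG2 terrain sr sc + max 0 (-(pvG2 obstacle sr sc))
        - pvG2 terrain s.1 s.2.1 + max 0 (-(pvG2 obstacle s.1 s.2.1)) := by
    intro s hs
    induction hs with
    | init =>
      refine ⟨hsr0, hsr, hsc0, hsc, le_refl _, ?_⟩
      have h1 := le_max_left 0 (-(pvG2 obstacle sr sc))
      dsimp only
      omega
    | @step u t hu ht ih =>
      obtain ⟨h1, h2, h3, h4, h5, h6, hnb⟩ := pvMem_succ ht
      obtain ⟨i1, i2, i3, i4, i5, i6⟩ := ih
      have hsum : 0 ≤ pvG2 obstacle u.1 u.2.1 + pvG2 obstacle t.1 t.2.1 :=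
        pvAdj_pair hRow hCol holen horect hadj (by omega) i1 i2 i3 i4 h1 h2 h3 h4 hnb
      have hm1 := max_choice (0 : Int) (-(pvG2 obstacle u.1 u.2.1))
      have hm2 := max_choice (0 : Int) (-(pvG2 obstacle t.1 t.2.1))
      have hl1 := le_max_left (0 : Int) (-(pvG2 obstacle u.1 u.2.1))
      have hl3 := le_max_left (0 : Int) (-(pvG2 obstacle t.1 t.2.1))
      exact ⟨h1, h2, h3, h4, by omega, by omega⟩
  obtain ⟨h1, h2, h3, h4, h5, h6⟩ := key s h
  have hb1 := pvG2_bounds hrect hsr0 (by omega) hsc0 (by omega)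
  have hb2 := pvG2_bounds hrect h1 (by omega) h3 (by omega)
  have hbo1 := pvG2_bounds horect hsr0 (by omega : sr < (obstacle.length : Int)) hsc0 (by omega)
  have hbo2 := pvG2_bounds horect h1 (by omega : s.1 < (obstacle.length : Int)) h3 (by omega)
  have hmin := (PySem.List.foldl_min_le obstacle.flatten 0).1
  have hm1 := max_choice (0 : Int) (-(pvG2 obstacle sr sc))
  have hm2 := max_choice (0 : Int) (-(pvG2 obstacle s.1 s.2.1))
  refine ⟨h1, h2, h3, h4, h5, ?_⟩
  unfold pvSpread
  omega

theorem pvCard_le {vis : List (Int × Int × Int)} {Row Col : Int} {terrain obstacle : List (List Int)}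
    (hnd : vis.Nodup) (hsub : ∀ s ∈ vis, pvInSpace Row Col terrain obstacle s) :
    vis.length ≤ pvN Row Col terrain obstacle := by
  classical
  have hsub' : vis.toFinset ⊆ Finset.Icc 0 (Row-1) ×ˢ Finset.Icc 0 (Col-1) ×ˢ Finset.Icc 1 (pvSpread terrain obstacle) := by
    intro s hs
    obtain ⟨h1, h2, h3, h4, h5, h6⟩ := hsub s (List.mem_toFinset.mp hs)
    simp [Finset.mem_product, Finset.mem_Icc]
    omega
  have hcard := Finset.card_le_card hsub'
  rw [List.toFinset_card_of_nodup hnd] at hcard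
  have hc : (Finset.Icc (0:Int) (Row-1) ×ˢ Finset.Icc (0:Int) (Col-1) ×ˢ Finset.Icc (1:Int) (pvSpread terrain obstacle)).card
      = Row.toNat * (Col.toNat * (pvSpread terrain obstacle).toNat) := by
    rw [Finset.card_product, Finset.card_product, Int.card_Icc, Int.card_Icc, Int.card_Icc]
    congr 2 <;> omega
  rw [hc] at hcard
  refine le_trans hcard ?_
  unfold pvN
  rcases le_or_gt Row 0 with hR | hR
  · simp [Int.toNat_of_nonpos hR]
  rcases le_or_gt Col 0 with hC | hC
  · simp [Int.toNat_of_nonpos hC]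
  rcases le_or_gt (pvSpread terrain obstacle) 0 with hS | hS
  · simp [Int.toNat_of_nonpos hS]
  rw [Int.toNat_mul (by positivity) (by omega), Int.toNat_mul (by omega) (by omega), mul_assoc]

-- ----- the A loop saturates PvReach -----

def pvInvA (Row Col sr sc : Int) (terrain obstacle : List (List Int))
    (res : List (Int × Int)) (vis : List (Int × Int × Int)) (q : List (Int × Int × Int)) : Prop :=
  vis.Nodup ∧ res.Nodup ∧
  (∀ s ∈ vis, PvReach Row Col sr sc terrain obstacle s) ∧
  (∀ s ∈ q, PvReach Row Col sr sc terrain obstacle s) ∧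
  ((sr, sc, 1) ∈ vis ∨ (sr, sc, 1) ∈ q) ∧
  (∀ s ∈ vis, ∀ t ∈ pvSucc Row Col terrain obstacle s.1 s.2.1 s.2.2, t ∈ vis ∨ t ∈ q) ∧
  (∀ p : Int × Int, p ∈ res ↔ ((p.1, p.2, 1) ∈ vis ∧ p ≠ (sr, sc)))

-- the result set always stays strictly smaller than Row*Col (start cell excluded)
theorem pvRes_lt {res : List (Int × Int)} {Row Col sr sc : Int}
    (hnd : res.Nodup)
    (hbound : ∀ p ∈ res, 0 ≤ p.1 ∧ p.1 < Row ∧ 0 ≤ p.2 ∧ p.2 < Col)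
    (hne : ∀ p ∈ res, p ≠ (sr, sc))
    (hsr0 : 0 ≤ sr) (hsr : sr < Row) (hsc0 : 0 ≤ sc) (hsc : sc < Col) :
    (res.length : Int) < Row * Col := by
  classical
  have hsub : res.toFinset ⊆ (Finset.Icc 0 (Row-1) ×ˢ Finset.Icc 0 (Col-1)).erase (sr, sc) := by
    intro p hp
    have hmem := List.mem_toFinset.mp hp
    obtain ⟨h1, h2, h3, h4⟩ := hbound p hmem
    refine Finset.mem_erase.mpr ⟨hne p hmem, ?_⟩
    simp [Finset.mem_product, Finset.mem_Icc]
    omega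
  have hstart : ((sr, sc) : Int × Int) ∈ Finset.Icc (0:Int) (Row-1) ×ˢ Finset.Icc (0:Int) (Col-1) := by
    simp [Finset.mem_product, Finset.mem_Icc]
    omega
  have hcard := Finset.card_le_card hsub
  rw [List.toFinset_card_of_nodup hnd, Finset.card_erase_of_mem hstart,
    Finset.card_product, Int.card_Icc, Int.card_Icc] at hcard
  have h1 : (Row - 1 + 1 - 0).toNat = Row.toNat := by omega
  have h2 : (Col - 1 + 1 - 0).toNat = Col.toNat := by omega
  rw [h1, h2] at hcard
  have hRC : Row * Col = ((Row.toNat * Col.toNat : Nat) : Int) := by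
    push_cast
    rw [Int.toNat_of_nonneg (by omega), Int.toNat_of_nonneg (by omega)]
  rw [hRC]
  have hpos : 1 ≤ Row.toNat * Col.toNat :=
    Nat.one_le_iff_ne_zero.mpr (Nat.mul_ne_zero (by omega) (by omega))
  omega

theorem pvLoopA_run {Row Col sr sc : Int} {terrain obstacle : List (List Int)}
    (hRow : Row = terrain.length) (hCol : Col = ((terrain.headD []).length : Int))
    (hrect : ∀ row ∈ terrain, row.length = (terrain.headD []).length)
    (holen : obstacle.length = terrain.length)
    (horect : ∀ row ∈ obstacle, row.length = (terrain.headD []).length)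
    (hadj : pvAdjPre obstacle)
    (hsr0 : 0 ≤ sr) (hsr : sr < Row) (hsc0 : 0 ≤ sc) (hsc : sc < Col) :
    ∀ (fuel : Nat) (res : List (Int × Int)) (vis q : List (Int × Int × Int)),
    pvInvA Row Col sr sc terrain obstacle res vis q →
    q.length + 5 * (pvN Row Col terrain obstacle - vis.length) + 1 ≤ fuel →
    ∃ res' vis', pvLoopA Row Col sr sc terrain obstacle fuel res vis q = (res', vis') ∧
      pvInvA Row Col sr sc terrain obstacle res' vis' [] := by
  intro fuel
  induction fuel with
  | zero => intro res vis q hInv hfuel; omega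
  | succ f ih =>
    intro res vis q hInv hfuel
    match q with
    | [] => exact ⟨res, vis, rfl, hInv⟩
    | (r, c, v) :: q =>
      obtain ⟨hVnd, hRnd, hVreach, hQreach, hInit, hClosed, hRes⟩ := hInv
      simp only [List.length_cons] at hfuel
      have hreach : PvReach Row Col sr sc terrain obstacle (r, c, v) :=
        hQreach _ (List.mem_cons_self ..)
      by_cases hmem : ((r, c, v) : Int × Int × Int) ∈ vis
      · -- already visited: skip
        have hstep : pvLoopA Row Col sr sc terrain obstacle (f+1) res vis ((r, c, v) :: q) =
            pvLoopA Row Col sr sc terrain obstacle f res vis q := by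
          show (if ((r, c, v) : Int × Int × Int) ∈ vis then _ else _) = _
          rw [if_pos hmem]
        rw [hstep]
        refine ih res vis q ⟨hVnd, hRnd, hVreach, ?_, ?_, ?_, hRes⟩ (by omega)
        · exact fun s hs => hQreach s (List.mem_cons_of_mem _ hs)
        · rcases hInit with h | h
          · exact Or.inl h
          · rcases List.mem_cons.mp h with h' | h'
            · exact Or.inl (h' ▸ hmem)
            · exact Or.inr h'
        · intro s hs t ht
          rcases hClosed s hs t ht with h | h
          · exact Or.inl h
          · rcases List.mem_cons.mp h with h' | h'
            · exact Or.inl (h' ▸ hmem)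
            · exact Or.inr h'
      · -- new state
        have hadd : PySem.Set.add vis (r, c, v) = vis ++ [(r, c, v)] :=
          PySem.Set.add_of_not_mem hmem
        have hVnd' : (PySem.Set.add vis (r, c, v)).Nodup := PySem.Set.nodup_add _ _ hVnd
        have hVreach' : ∀ s ∈ PySem.Set.add vis (r, c, v),
            PvReach Row Col sr sc terrain obstacle s := by
          intro s hs
          rcases (PySem.Set.mem_add vis _ s).mp hs with h | h
          · exact hVreach _ h
          · exact h ▸ hreach
        have hlen' : (PySem.Set.add vis (r, c, v)).length = vis.length + 1 := by
          rw [hadd]; simp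
        have hcard' : (PySem.Set.add vis (r, c, v)).length ≤ pvN Row Col terrain obstacle := by
          refine pvCard_le hVnd' ?_
          intro s hs
          exact pvReach_inSpace hRow hCol hrect holen horect hadj hsr0 hsr hsc0 hsc (hVreach' s hs)
        have hQreach' : ∀ s ∈ q ++ pvSucc Row Col terrain obstacle r c v,
            PvReach Row Col sr sc terrain obstacle s := by
          intro s hs
          rcases List.mem_append.mp hs with h | h
          · exact hQreach s (List.mem_cons_of_mem _ h)
          · exact PvReach.step hreach h
        have hInit' : ((sr, sc, 1) : Int × Int × Int) ∈ PySem.Set.add vis (r, c, v) ∨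
            (sr, sc, 1) ∈ q ++ pvSucc Row Col terrain obstacle r c v := by
          rcases hInit with h | h
          · exact Or.inl ((PySem.Set.mem_add vis _ _).mpr (Or.inl h))
          · rcases List.mem_cons.mp h with h' | h'
            · exact Or.inl ((PySem.Set.mem_add vis _ _).mpr (Or.inr h'))
            · exact Or.inr (List.mem_append.mpr (Or.inl h'))
        have hClosed' : ∀ s ∈ PySem.Set.add vis (r, c, v),
            ∀ t ∈ pvSucc Row Col terrain obstacle s.1 s.2.1 s.2.2,
            t ∈ PySem.Set.add vis (r, c, v) ∨ t ∈ q ++ pvSucc Row Col terrain obstacle r c v := by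
          intro s hs t ht
          rcases (PySem.Set.mem_add vis _ s).mp hs with h | h
          · rcases hClosed s h t ht with h' | h'
            · exact Or.inl ((PySem.Set.mem_add vis _ _).mpr (Or.inl h'))
            · rcases List.mem_cons.mp h' with h'' | h''
              · exact Or.inl ((PySem.Set.mem_add vis _ _).mpr (Or.inr h''))
              · exact Or.inr (List.mem_append.mpr (Or.inl h''))
          · subst h
            exact Or.inr (List.mem_append.mpr (Or.inr ht))
        have hsucc := pvSucc_length_le Row Col terrain obstacle r c v
        by_cases hcond : v = 1 ∧ ((r, c) : Int × Int) ≠ (sr, sc)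
        · -- res gains (r, c)
          have hrnotmem : ((r, c) : Int × Int) ∉ res := by
            intro h
            exact hmem (hcond.1 ▸ ((hRes (r, c)).mp h).1)
          have hradd : PySem.Set.add res (r, c) = res ++ [(r, c)] :=
            PySem.Set.add_of_not_mem hrnotmem
          have hRnd' : (PySem.Set.add res (r, c)).Nodup := PySem.Set.nodup_add _ _ hRnd
          have hRes' : ∀ p : Int × Int, p ∈ PySem.Set.add res (r, c) ↔
              ((p.1, p.2, 1) ∈ PySem.Set.add vis (r, c, v) ∧ p ≠ (sr, sc)) := by
            intro p
            obtain ⟨p1, p2⟩ := p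
            rw [PySem.Set.mem_add res _ _]
            constructor
            · rintro (h | h)
              · obtain ⟨b1, b2⟩ := (hRes (p1, p2)).mp h
                exact ⟨(PySem.Set.mem_add vis _ _).mpr (Or.inl b1), b2⟩
              · obtain ⟨rfl, rfl⟩ : p1 = r ∧ p2 = c := by simpa using h
                exact ⟨(PySem.Set.mem_add vis _ _).mpr (Or.inr (by rw [hcond.1])), hcond.2⟩
            · rintro ⟨b1, b2⟩
              rcases (PySem.Set.mem_add vis _ _).mp b1 with h | h
              · exact Or.inl ((hRes (p1, p2)).mpr ⟨h, b2⟩)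
              · have : p1 = r ∧ p2 = c := by simpa using ⟨congrArg Prod.fst h, congrArg (fun s => s.2.1) h⟩
                exact Or.inr (by simp [this.1, this.2])
          -- the break test is never true
          have hbreak : ¬ (((PySem.Set.add res (r, c)).length : Int) = Row * Col) := by
            have hb : ∀ p ∈ PySem.Set.add res (r, c), 0 ≤ p.1 ∧ p.1 < Row ∧ 0 ≤ p.2 ∧ p.2 < Col := by
              intro p hp
              have h1 := ((hRes' p).mp hp).1
              have h2 := pvReach_inSpace hRow hCol hrect holen horect hadj hsr0 hsr hsc0 hsc
                (hVreach' _ h1)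
              obtain ⟨c1, c2, c3, c4, c5, c6⟩ := h2
              exact ⟨c1, c2, c3, c4⟩
            have hn : ∀ p ∈ PySem.Set.add res (r, c), p ≠ ((sr, sc) : Int × Int) :=
              fun p hp => ((hRes' p).mp hp).2
            have := pvRes_lt hRnd' hb hn hsr0 hsr hsc0 hsc
            omega
          have hstep : pvLoopA Row Col sr sc terrain obstacle (f+1) res vis ((r, c, v) :: q) =
              pvLoopA Row Col sr sc terrain obstacle f (PySem.Set.add res (r, c))
                (PySem.Set.add vis (r, c, v)) (q ++ pvSucc Row Col terrain obstacle r c v) := by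
            show (if ((r, c, v) : Int × Int × Int) ∈ vis then _ else _) = _
            rw [if_neg hmem]
            show (if v = 1 ∧ ((r, c) : Int × Int) ≠ (sr, sc) then _ else _) = _
            rw [if_pos hcond]
            show (if ((PySem.Set.add res (r, c)).length : Int) = Row * Col then _ else _) = _
            rw [if_neg hbreak]
          rw [hstep]
          refine ih _ _ _ ⟨hVnd', hRnd', hVreach', hQreach', hInit', hClosed', hRes'⟩ ?_
          simp only [List.length_append]
          omega
        · -- res unchanged
          have hRes' : ∀ p : Int × Int, p ∈ res ↔
              ((p.1, p.2, 1) ∈ PySem.Set.add vis (r, c, v) ∧ p ≠ (sr, sc)) := by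
            intro p
            obtain ⟨p1, p2⟩ := p
            constructor
            · intro h
              obtain ⟨b1, b2⟩ := (hRes (p1, p2)).mp h
              exact ⟨(PySem.Set.mem_add vis _ _).mpr (Or.inl b1), b2⟩
            · rintro ⟨b1, b2⟩
              rcases (PySem.Set.mem_add vis _ _).mp b1 with h | h
              · exact (hRes (p1, p2)).mpr ⟨h, b2⟩
              · exfalso
                have hv1 : v = 1 := by simpa using (congrArg (fun s => s.2.2) h).symm
                have hp1 : p1 = r := by simpa using congrArg Prod.fst h
                have hp2 : p2 = c := by simpa using congrArg (fun s => s.2.1) h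
                have : ((r, c) : Int × Int) = (sr, sc) := by
                  by_contra hne
                  exact hcond ⟨hv1, hne⟩
                exact b2 (by rw [hp1, hp2, this])
          have hstep : pvLoopA Row Col sr sc terrain obstacle (f+1) res vis ((r, c, v) :: q) =
              pvLoopA Row Col sr sc terrain obstacle f res
                (PySem.Set.add vis (r, c, v)) (q ++ pvSucc Row Col terrain obstacle r c v) := by
            show (if ((r, c, v) : Int × Int × Int) ∈ vis then _ else _) = _
            rw [if_neg hmem]
            show (if v = 1 ∧ ((r, c) : Int × Int) ≠ (sr, sc) then _ else _) = _
            rw [if_neg hcond]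
          rw [hstep]
          refine ih _ _ _ ⟨hVnd', hRnd, hVreach', hQreach', hInit', hClosed', hRes'⟩ ?_
          simp only [List.length_append]
          omega

-- ----- the B fixed-point iteration saturates PvReach -----

-- B's hoisted successor computation equals A's (the speed terms are rearranged by ring)
theorem pvSuccB_eq (Row Col : Int) (terrain obstacle : List (List Int)) (r c v : Int) :
    pvSuccB Row Col terrain obstacle r c v = pvSucc Row Col terrain obstacle r c v := by
  unfold pvSuccB pvSucc
  show List.filterMap _ _ = List.filterMap _ _
  congr 1
  funext p
  have h : pvG2 terrain r c + v - pvG2 terrain p.1 p.2 - pvG2 obstacle p.1 p.2 =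
      pvG2 terrain r c - pvG2 terrain p.1 p.2 - pvG2 obstacle p.1 p.2 + v := by ring
  rw [h]

-- membership in one round's image
theorem pvImage_mem {Row Col : Int} {terrain obstacle : List (List Int)}
    (vis : List (Int × Int × Int)) (t : Int × Int × Int) :
    t ∈ pvImage Row Col terrain obstacle vis ↔
      ∃ s ∈ vis, t ∈ pvSucc Row Col terrain obstacle s.1 s.2.1 s.2.2 := by
  have key : ∀ (l : List (Int × Int × Int)) (acc : PySem.Set (Int × Int × Int)),
      t ∈ l.foldl (fun acc s =>
        PySem.Set.update acc (pvSuccB Row Col terrain obstacle s.1 s.2.1 s.2.2)) acc ↔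
      t ∈ acc ∨ ∃ s ∈ l, t ∈ pvSucc Row Col terrain obstacle s.1 s.2.1 s.2.2 := by
    intro l
    induction l with
    | nil => intro acc; simp
    | cons a l ih =>
      intro acc
      rw [List.foldl_cons, ih, PySem.Set.mem_update, pvSuccB_eq]
      simp only [List.mem_cons]
      constructor
      · rintro ((h | h) | ⟨s, hs, ht⟩)
        · exact Or.inl h
        · exact Or.inr ⟨a, Or.inl rfl, h⟩
        · exact Or.inr ⟨s, Or.inr hs, ht⟩
      · rintro (h | ⟨s, (rfl | hs), ht⟩)
        · exact Or.inl (Or.inl h)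
        · exact Or.inl (Or.inr ht)
        · exact Or.inr ⟨s, hs, ht⟩
  rw [pvImage, key]
  simp [PySem.Set.empty]

theorem pvLoopB_run {Row Col sr sc : Int} {terrain obstacle : List (List Int)}
    (hRow : Row = terrain.length) (hCol : Col = ((terrain.headD []).length : Int))
    (hrect : ∀ row ∈ terrain, row.length = (terrain.headD []).length)
    (holen : obstacle.length = terrain.length)
    (horect : ∀ row ∈ obstacle, row.length = (terrain.headD []).length)
    (hadj : pvAdjPre obstacle)
    (hsr0 : 0 ≤ sr) (hsr : sr < Row) (hsc0 : 0 ≤ sc) (hsc : sc < Col) :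
    ∀ (fuel : Nat) (vis : List (Int × Int × Int)),
    vis.Nodup → (∀ s ∈ vis, PvReach Row Col sr sc terrain obstacle s) →
    (sr, sc, 1) ∈ vis →
    pvN Row Col terrain obstacle - vis.length + 1 ≤ fuel →
    (pvLoopB Row Col terrain obstacle fuel vis).Nodup ∧
    (∀ s ∈ pvLoopB Row Col terrain obstacle fuel vis,
      PvReach Row Col sr sc terrain obstacle s) ∧
    (sr, sc, 1) ∈ pvLoopB Row Col terrain obstacle fuel vis ∧
    (∀ s ∈ pvLoopB Row Col terrain obstacle fuel vis,
      ∀ t ∈ pvSucc Row Col terrain obstacle s.1 s.2.1 s.2.2,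
        t ∈ pvLoopB Row Col terrain obstacle fuel vis) := by
  intro fuel
  induction fuel with
  | zero => intro vis _ _ _ hfuel; omega
  | succ f ih =>
    intro vis hnd hreach hinit hfuel
    by_cases hsub : PySem.Set.issubset (pvImage Row Col terrain obstacle vis) vis = true
    · -- image already contained: the loop stops here, vis is closed
      have hstep : pvLoopB Row Col terrain obstacle (f+1) vis = vis := by
        show (if PySem.Set.issubset (pvImage Row Col terrain obstacle vis) vis = true
          then vis else _) = vis
        rw [if_pos hsub]
      rw [hstep]
      refine ⟨hnd, hreach, hinit, ?_⟩
      intro s hs t ht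
      exact (PySem.Set.issubset_iff _ _).mp hsub t
        ((pvImage_mem vis t).mpr ⟨s, hs, ht⟩)
    · -- a genuinely new state exists: union the image in and recurse
      have hstep : pvLoopB Row Col terrain obstacle (f+1) vis =
          pvLoopB Row Col terrain obstacle f
            (PySem.Set.update vis (pvImage Row Col terrain obstacle vis)) := by
        show (if PySem.Set.issubset (pvImage Row Col terrain obstacle vis) vis = true
          then vis else _) = _
        rw [if_neg hsub]
      rw [hstep]
      obtain ⟨t0, ht0img, ht0vis⟩ :
          ∃ t0 ∈ pvImage Row Col terrain obstacle vis, t0 ∉ vis := by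
        by_contra hcon
        push Not at hcon
        exact hsub ((PySem.Set.issubset_iff _ _).mpr hcon)
      set vis' := PySem.Set.update vis (pvImage Row Col terrain obstacle vis) with hvis'
      have hnd' : vis'.Nodup := PySem.Set.nodup_update _ _ hnd
      have hreach' : ∀ s ∈ vis', PvReach Row Col sr sc terrain obstacle s := by
        intro s hs
        rcases (PySem.Set.mem_update _ _ _).mp hs with h | h
        · exact hreach s h
        · obtain ⟨u, hu, hsu⟩ := (pvImage_mem vis s).mp h
          exact PvReach.step (hreach u hu) hsu
      have hinit' : ((sr, sc, 1) : Int × Int × Int) ∈ vis' :=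
        (PySem.Set.mem_update _ _ _).mpr (Or.inl hinit)
      have hcard' : vis'.length ≤ pvN Row Col terrain obstacle := by
        refine pvCard_le hnd' ?_
        intro s hs
        exact pvReach_inSpace hRow hCol hrect holen horect hadj hsr0 hsr hsc0 hsc (hreach' s hs)
      have hgrow : vis.length + 1 ≤ vis'.length := by
        have hsubperm : (vis ++ [t0]).Subperm vis' := by
          refine List.Nodup.subperm ?_ ?_
          · exact List.Nodup.append hnd (List.nodup_singleton _)
              (by simpa using ht0vis)
          · intro x hx
            rcases List.mem_append.mp hx with h | h
            · exact (PySem.Set.mem_update _ _ _).mpr (Or.inl h)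
            · rw [List.mem_singleton.mp h]
              exact (PySem.Set.mem_update _ _ _).mpr (Or.inr ht0img)
        have := hsubperm.length_le
        simpa using this
      exact ih vis' hnd' hreach' hinit' (by omega)

-- ----- the final comprehension over the saturated set -----

theorem pvResB_mem (vis : List (Int × Int × Int)) (sr sc : Int) (p : Int × Int) :
    (p ∈ vis.filterMap (fun s =>
      if s.2.2 = 1 ∧ ((s.1, s.2.1) : Int × Int) ≠ (sr, sc) then some (s.1, s.2.1) else none)) ↔
    ((p.1, p.2, 1) ∈ vis ∧ p ≠ (sr, sc)) := by
  obtain ⟨p1, p2⟩ := p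
  rw [List.mem_filterMap]
  constructor
  · rintro ⟨s, hs, heq⟩
    split at heq
    · rename_i hcond
      simp only [Option.some.injEq, Prod.mk.injEq] at heq
      obtain ⟨rfl, rfl⟩ := heq
      have hseq : s = (s.1, s.2.1, 1) := by
        obtain ⟨a, b, c⟩ := s
        simp only at hcond ⊢
        rw [hcond.1]
      exact ⟨hseq ▸ hs, hcond.2⟩
    · exact absurd heq (by simp)
  · rintro ⟨h1, h2⟩
    exact ⟨(p1, p2, 1), h1, by rw [if_pos]; exact ⟨rfl, h2⟩⟩

-- a closed visited set that contains the start contains every reachable state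
theorem pvReach_subset {Row Col sr sc : Int} {terrain obstacle : List (List Int)}
    {vis : List (Int × Int × Int)} (hinit : (sr, sc, 1) ∈ vis)
    (hclosed : ∀ s ∈ vis, ∀ t ∈ pvSucc Row Col terrain obstacle s.1 s.2.1 s.2.2, t ∈ vis)
    {s : Int × Int × Int} (h : PvReach Row Col sr sc terrain obstacle s) : s ∈ vis := by
  induction h with
  | init => exact hinit
  | step hs ht ih => exact hclosed _ ih _ ht

-- ----- sorted(res) depends only on res as a set -----

-- the lexicographic order on pairs that Python's sorted uses
def pvLe (a b : Int × Int) : Prop := a.1 < b.1 ∨ (a.1 = b.1 ∧ a.2 ≤ b.2)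

def pvLtb (a b : Int × Int) : Bool :=
  decide (a.1 < b.1) || (!decide (b.1 < a.1) && decide (a.2 < b.2))

theorem pvInsertBy_pairwise (x : Int × Int) (acc : List (Int × Int))
    (h : acc.Pairwise pvLe) : (PySem.List.insertBy pvLtb x acc).Pairwise pvLe := by
  induction acc with
  | nil => simp [PySem.List.insertBy]
  | cons y ys ih =>
    rw [List.pairwise_cons] at h
    obtain ⟨hy, hys⟩ := h
    show (if pvLtb x y = true then x :: y :: ys else y :: PySem.List.insertBy pvLtb x ys).Pairwise pvLe
    split
    · rename_i hlt
      simp only [pvLtb, Bool.or_eq_true, Bool.and_eq_true, decide_eq_true_eq,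
        Bool.not_eq_true', decide_eq_false_iff_not] at hlt
      have hxy : pvLe x y := by unfold pvLe; omega
      refine List.Pairwise.cons ?_ (List.Pairwise.cons hy hys)
      intro z hz
      rcases List.mem_cons.mp hz with rfl | hz'
      · exact hxy
      · have := hy z hz'
        unfold pvLe at *; omega
    · rename_i hnlt
      simp only [pvLtb, Bool.or_eq_true, Bool.and_eq_true, decide_eq_true_eq,
        Bool.not_eq_true', decide_eq_false_iff_not, not_or, not_and] at hnlt
      refine List.Pairwise.cons ?_ (ih hys)
      intro z hz
      rcases (PySem.List.mem_insertBy _ _ _ _).mp hz with rfl | hz'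
      · unfold pvLe; omega
      · exact hy z hz'

theorem pvSorted2_pairwise (xs : List (Int × Int)) :
    (PySem.List.sorted2 xs (fun q => q.1) (fun q => q.2)).Pairwise pvLe := by
  show (xs.foldl (fun acc x => PySem.List.insertBy _ x acc) []).Pairwise pvLe
  have h : ∀ (l : List (Int × Int)) (acc : List (Int × Int)), acc.Pairwise pvLe →
      (l.foldl (fun acc x => PySem.List.insertBy pvLtb x acc) acc).Pairwise pvLe := by
    intro l
    induction l with
    | nil => intro acc h; exact h
    | cons a l ih => intro acc h; exact ih _ (pvInsertBy_pairwise a acc h)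
  exact h xs [] (by simp)

-- sorted2 with the pair keys is determined up to permutation
theorem pvSorted2_eq_of_perm {xs ys : List (Int × Int)} (hp : xs.Perm ys) :
    PySem.List.sorted2 xs (fun q => q.1) (fun q => q.2) =
    PySem.List.sorted2 ys (fun q => q.1) (fun q => q.2) := by
  have p1 := PySem.List.sorted2_perm xs (fun q : Int × Int => q.1) (fun q => q.2) false
  have p2 := PySem.List.sorted2_perm ys (fun q : Int × Int => q.1) (fun q => q.2) false
  refine List.Perm.eq_of_pairwise ?_ (pvSorted2_pairwise xs) (pvSorted2_pairwise ys)
    (p1.trans (hp.trans p2.symm))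
  intro a b _ _ hab hba
  unfold pvLe at hab hba
  have : a.1 = b.1 ∧ a.2 = b.2 := by omega
  exact Prod.ext this.1 this.2

-- ----- the degenerate case: the start cannot move -----

theorem pvStuck_succ_nil {terrain obstacle : List (List Int)} {sr sc : Int}
    (hrect : ∀ row ∈ terrain, row.length = (terrain.headD []).length)
    (holen : obstacle.length = terrain.length)
    (horect : ∀ row ∈ obstacle, row.length = (terrain.headD []).length)
    (hrlo : -(terrain.length : Int) ≤ sr) (hr : sr < (terrain.length : Int))
    (hclo : -((terrain.headD []).length : Int) ≤ sc) (hc : sc < ((terrain.headD []).length : Int))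
    (hstuck : pvStartStuck terrain obstacle sr sc) :
    pvSucc (terrain.length : Int) ((terrain.headD []).length : Int) terrain obstacle sr sc 1 = [] := by
  rw [pvSucc, List.filterMap_eq_nil_iff]
  intro p hp
  split
  · rename_i hb
    obtain ⟨hb1, hb2, hb3, hb4⟩ := hb
    have hT0 : pvG2 terrain sr sc =
        pvCellP terrain (pvIdx sr terrain.length) (pvIdx sc (terrain.headD []).length) :=
      pvG2_wrap hrect hrlo hr hclo hc
    have hT1 : pvG2 terrain p.1 p.2 = pvCellP terrain p.1.toNat p.2.toNat :=
      pvG2_eq_cell hrect hb1 hb2 hb3 hb4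
    have hO1 : pvG2 obstacle p.1 p.2 = pvCellP obstacle p.1.toNat p.2.toNat :=
      pvG2_eq_cell horect hb1 (by omega) hb3 hb4
    have hle := hstuck p hp hb1 hb2 hb3 hb4
    rw [if_neg]
    rw [hT0, hT1, hO1]
    omega
  · rfl

theorem pvLoopA_stuck {Row Col sr sc : Int} {terrain obstacle : List (List Int)}
    (hnil : pvSucc Row Col terrain obstacle sr sc 1 = []) (f : Nat) :
    (pvLoopA Row Col sr sc terrain obstacle (f+1)
      PySem.Set.empty PySem.Set.empty [(sr, sc, 1)]).1 = PySem.Set.empty := by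
  have hstep : pvLoopA Row Col sr sc terrain obstacle (f+1)
      PySem.Set.empty PySem.Set.empty [(sr, sc, 1)] =
      pvLoopA Row Col sr sc terrain obstacle f PySem.Set.empty
        (PySem.Set.add PySem.Set.empty (sr, sc, 1))
        ([] ++ pvSucc Row Col terrain obstacle sr sc 1) := by
    have hm : ((sr, sc, 1) : Int × Int × Int) ∉ (PySem.Set.empty : PySem.Set (Int × Int × Int)) :=
      List.not_mem_nil
    show (if ((sr, sc, 1) : Int × Int × Int) ∈ (PySem.Set.empty : PySem.Set (Int × Int × Int))
        then _ else _) = _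
    rw [if_neg hm]
    show (if (1 : Int) = 1 ∧ ((sr, sc) : Int × Int) ≠ (sr, sc) then _ else _) = _
    rw [if_neg (by simp)]
  rw [hstep, hnil]
  cases f <;> rfl

theorem pvLoopB_stuck {Row Col sr sc : Int} {terrain obstacle : List (List Int)}
    (hnil : pvSucc Row Col terrain obstacle sr sc 1 = []) (f : Nat) :
    pvLoopB Row Col terrain obstacle (f+1) (PySem.Set.ofList [(sr, sc, 1)]) =
      [(sr, sc, 1)] := by
  have hOf : PySem.Set.ofList [((sr, sc, 1) : Int × Int × Int)] = [(sr, sc, 1)] :=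
    PySem.Set.ofList_eq_self_of_nodup _ (List.nodup_singleton _)
  have himg : pvImage Row Col terrain obstacle [(sr, sc, 1)] = PySem.Set.empty := by
    unfold pvImage
    rw [List.foldl_cons, List.foldl_nil]
    show PySem.Set.update PySem.Set.empty (pvSuccB Row Col terrain obstacle sr sc 1) = _
    rw [pvSuccB_eq, hnil]
    rfl
  rw [hOf]
  show (if PySem.Set.issubset (pvImage Row Col terrain obstacle [(sr, sc, 1)]) [(sr, sc, 1)] = true
    then _ else _) = _
  rw [if_pos (by rw [himg]; exact (PySem.Set.issubset_iff _ _).mpr (by simp [PySem.Set.empty]))]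

-- ===== VERDICT (by name: the statement is the Claim_ definition above) =====
theorem bicycleYard_spec : Claim_equal_bicycleYard := by
  unfold Claim_equal_bicycleYard
  intro position terrain obstacle _ hPre
  obtain ⟨hplen, hne, hcolpos, hrect, holen, horect, ha1, ha2, ha3, ha4, hdisj⟩ := hPre
  unfold Spec_bicycleYard
  simp only [bicycleYard, bicycleYard_alt]
  have hsr_eq : (PySem.List.pyGet? position 0).getD 0 = position.getD 0 0 := by
    have h := PySem.List.pyGetD_of_nonneg position (0 : Int) (le_refl 0)
    simpa [PySem.List.pyGetD] using h
  have hsc_eq : (PySem.List.pyGet? position 1).getD 0 = position.getD 1 0 := by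
    have h := PySem.List.pyGetD_of_nonneg position (0 : Int) (by omega : (0:Int) ≤ 1)
    simpa [PySem.List.pyGetD] using h
  rw [hsr_eq, hsc_eq]
  set sr : Int := position.getD 0 0 with hsrdef
  set sc : Int := position.getD 1 0 with hscdef
  set Row : Int := (terrain.length : Int) with hRowdef
  set Col : Int := ((terrain.headD []).length : Int) with hColdef
  have hS1 : 1 ≤ pvSpread terrain obstacle := by
    have h1 := (PySem.List.le_foldl_max terrain.flatten 0).1
    have h2 := (PySem.List.foldl_min_le terrain.flatten 0).1
    have h3 := (PySem.List.foldl_min_le obstacle.flatten 0).1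
    unfold pvSpread
    omega
  have hRow1 : 1 ≤ Row := by
    have : terrain.length ≠ 0 := fun h => hne (List.length_eq_zero_iff.mp h)
    omega
  have hCol1 : 1 ≤ Col := by omega
  have hX : 0 ≤ Row * Col * pvSpread terrain obstacle :=
    mul_nonneg (mul_nonneg (by omega) (by omega)) (by omega)
  rcases hdisj with hstuck | ⟨hsr0, hsc0, hadj⟩
  · -- the start cannot move: both programs return the empty result
    have hnil : pvSucc Row Col terrain obstacle sr sc 1 = [] :=
      pvStuck_succ_nil hrect holen horect ha1 ha2 ha3 ha4 hstuck
    obtain ⟨fA, hfA⟩ : ∃ f, (5 * (Row * Col * pvSpread terrain obstacle) + 2).toNat = f + 1 :=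
      ⟨(5 * (Row * Col * pvSpread terrain obstacle) + 2).toNat - 1, by omega⟩
    obtain ⟨fB, hfB⟩ : ∃ f, (Row * Col * pvSpread terrain obstacle + 2).toNat = f + 1 :=
      ⟨(Row * Col * pvSpread terrain obstacle + 2).toNat - 1, by omega⟩
    rw [hfA, hfB, pvLoopA_stuck hnil fA, pvLoopB_stuck hnil fB]
    have hfm : [((sr, sc, 1) : Int × Int × Int)].filterMap (fun s =>
        if s.2.2 = 1 ∧ ((s.1, s.2.1) : Int × Int) ≠ (sr, sc) then some (s.1, s.2.1) else none)
        = [] := by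
      simp
    rw [hfm]
    rfl
  · -- the ordinary case: both programs saturate the reachable-state set
    have hrect' : ∀ row ∈ terrain, row.length = (terrain.headD []).length := hrect
    obtain ⟨resA, visA, hEqA, hInvA⟩ :=
      pvLoopA_run (Row := Row) (Col := Col) (sr := sr) (sc := sc)
        (terrain := terrain) (obstacle := obstacle) rfl rfl hrect' holen horect hadj
        hsr0 ha2 hsc0 ha4
        ((5 * (Row * Col * pvSpread terrain obstacle) + 2).toNat)
        PySem.Set.empty PySem.Set.empty [(sr, sc, 1)]
        ⟨List.nodup_nil, List.nodup_nil, by simp [PySem.Set.empty],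
          by
            intro s hs
            rcases List.mem_singleton.mp hs with rfl
            exact PvReach.init,
          Or.inr (List.mem_singleton.mpr rfl),
          by simp [PySem.Set.empty],
          by simp [PySem.Set.empty]⟩
        (by simp only [List.length_singleton]; unfold pvN; omega)
    have hOf : PySem.Set.ofList [((sr, sc, 1) : Int × Int × Int)] = [(sr, sc, 1)] :=
      PySem.Set.ofList_eq_self_of_nodup _ (List.nodup_singleton _)
    obtain ⟨bnd, bsound, binit, bclosed⟩ :=
      pvLoopB_run (Row := Row) (Col := Col) (sr := sr) (sc := sc)
        (terrain := terrain) (obstacle := obstacle) rfl rfl hrect' holen horect hadj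
        hsr0 ha2 hsc0 ha4
        ((Row * Col * pvSpread terrain obstacle + 2).toNat)
        (PySem.Set.ofList [(sr, sc, 1)])
        (by rw [hOf]; exact List.nodup_singleton _)
        (by
          rw [hOf]
          intro s hs
          rcases List.mem_singleton.mp hs with rfl
          exact PvReach.init)
        (by rw [hOf]; exact List.mem_singleton.mpr rfl)
        (by rw [hOf]; simp only [List.length_singleton]; unfold pvN; omega)
    set visB := pvLoopB Row Col terrain obstacle
        ((Row * Col * pvSpread terrain obstacle + 2).toNat)
        (PySem.Set.ofList [(sr, sc, 1)]) with hvisB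
    obtain ⟨andA, rndA, soundA, _, initA, closedA, charA⟩ := hInvA
    have hVisA : ∀ s, s ∈ visA ↔ PvReach Row Col sr sc terrain obstacle s := by
      intro s
      refine ⟨soundA s, ?_⟩
      refine pvReach_subset (initA.resolve_right (List.not_mem_nil)) ?_
      intro u hu t ht
      exact (closedA u hu t ht).resolve_right (List.not_mem_nil)
    have hVisB : ∀ s, s ∈ visB ↔ PvReach Row Col sr sc terrain obstacle s := by
      intro s
      exact ⟨bsound s, pvReach_subset binit bclosed⟩
    have hmemA : ∀ p : Int × Int, p ∈ resA ↔
        (PvReach Row Col sr sc terrain obstacle (p.1, p.2, 1) ∧ p ≠ (sr, sc)) := by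
      intro p
      rw [charA p, hVisA]
    set resB : PySem.Set (Int × Int) := PySem.Set.ofList (visB.filterMap (fun s =>
      if s.2.2 = 1 ∧ ((s.1, s.2.1) : Int × Int) ≠ (sr, sc) then some (s.1, s.2.1) else none))
      with hresB
    have hmemB : ∀ p : Int × Int, p ∈ resB ↔
        (PvReach Row Col sr sc terrain obstacle (p.1, p.2, 1) ∧ p ≠ (sr, sc)) := by
      intro p
      rw [hresB, PySem.Set.mem_ofList, pvResB_mem, hVisB]
    have hperm : resA.Perm resB := by
      refine (List.perm_ext_iff_of_nodup rndA (PySem.Set.nodup_ofList _)).mpr ?_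
      intro p
      rw [hmemA, hmemB]
    rw [hEqA]
    exact pvSorted2_eq_of_perm hperm
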